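-- pv_equiv track=rewrite | github.com/DevSecArs/Dnf-Simplifier | dnf_simplifier.py | simplify_dnf
-- ===== SOURCE A (Python) =====
-- def simplify_dnf(terms):
-- 	# Удаляем дубликаты
-- 	unique = []
-- 	for t in terms:
-- 		if t not in unique:
-- 			unique.append(t)
-- 	# Поглощение: если есть t1 ⊆ t2, то t2 удаляется
-- 	result = []
-- 	for t in unique:
-- 		if not any((t2 < t) for t2 in unique):
-- 			result.append(t)
-- 	return result
-- ===== SOURCE B (Python) =====
-- def simplify_dnf(terms):
--     # One pass: maintain the minimal (non-absorbed, deduplicated) terms seen so far.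
--     result = []
--     for t in terms:
--         if any(m == t or m < t for m in result):
--             continue  # duplicate of a kept term, or absorbed by a kept subset
--         result = [m for m in result if not t < m] + [t]  # t absorbs kept supersets
--     return result
-- ===== Notes on version B (the rewrite author's own statement) =====
-- stated objective: alternative
-- what changed: A dedups the whole list and then filters it against the whole dedup list in a second quadratic pass; B makes one left-to-right pass maintaining the list of minimal kept terms, skipping a term when a kept term equals it or is a proper subset of it and evicting kept proper supersets when it is appended.
import Mathlib
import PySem

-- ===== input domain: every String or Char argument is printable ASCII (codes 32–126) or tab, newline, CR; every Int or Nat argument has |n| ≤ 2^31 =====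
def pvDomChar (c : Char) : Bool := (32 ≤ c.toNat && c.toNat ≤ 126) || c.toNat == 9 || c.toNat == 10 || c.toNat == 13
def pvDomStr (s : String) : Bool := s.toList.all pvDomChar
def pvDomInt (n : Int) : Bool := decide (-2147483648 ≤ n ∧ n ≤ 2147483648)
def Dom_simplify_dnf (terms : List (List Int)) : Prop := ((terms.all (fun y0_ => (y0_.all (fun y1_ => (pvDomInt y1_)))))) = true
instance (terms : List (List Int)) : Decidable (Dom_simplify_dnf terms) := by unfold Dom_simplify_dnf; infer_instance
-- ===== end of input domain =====

-- B folds A's two quadratic passes (dedup, then absorption filter) into one left-to-right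
-- pass that maintains the list of minimal terms seen so far.

-- Python set comparisons on the List-Int representation of a set (shared by both ports):
-- a == b, a < b (proper subset), and the subset test they are built from.
def pvSetLe (a b : List Int) : Bool := a.all (fun x => x ∈ b)
def pvSetEq (a b : List Int) : Bool := pvSetLe a b && pvSetLe b a
def pvSetLt (a b : List Int) : Bool := pvSetLe a b && !pvSetLe b a

-- ===== PORT A =====
def simplify_dnf (terms : List (List Int)) : List (List Int) :=
  -- unique = []; for t in terms: if t not in unique: unique.append(t)
  let unique := terms.foldl (fun u t => if u.any (fun x => pvSetEq x t) then u else u ++ [t]) []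
  -- result = []; for t in unique: if not any(t2 < t for t2 in unique): result.append(t)
  unique.foldl (fun r t => if unique.any (fun t2 => pvSetLt t2 t) then r else r ++ [t]) []

-- ===== PORT B =====
def simplify_dnf_alt (terms : List (List Int)) : List (List Int) :=
  -- result = []; for t in terms: skip if any kept m == t or m < t; else drop kept supersets, append t
  terms.foldl (fun res t =>
    if res.any (fun m => pvSetEq m t || pvSetLt m t) then res
    else res.filter (fun m => !pvSetLt t m) ++ [t]) []

-- ===== PRECONDITION & SPEC =====
def Spec_simplify_dnf (terms : List (List Int)) (out : List (List Int)) : Prop := out = simplify_dnf_alt terms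
instance (terms : List (List Int)) (out : List (List Int)) : Decidable (Spec_simplify_dnf terms out) := by unfold Spec_simplify_dnf; infer_instance

-- ===== CLAIM (what is proved, stated in full; the proofs are below) =====
def Claim_equal_simplify_dnf : Prop := ∀ (terms : List (List Int)), Dom_simplify_dnf terms → Spec_simplify_dnf terms (simplify_dnf terms)

-- ===== LEMMAS AND PROOFS =====

-- A's dedup accumulator, and the minimal elements of a list under pvSetLt
def pvU (terms : List (List Int)) : List (List Int) :=
  terms.foldl (fun u t => if u.any (fun x => pvSetEq x t) then u else u ++ [t]) []
def pvM (u : List (List Int)) : List (List Int) :=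
  u.filter (fun t => !u.any (fun t2 => pvSetLt t2 t))

theorem pv_le_iff (a b : List Int) : pvSetLe a b = true ↔ ∀ x ∈ a, x ∈ b := by
  simp [pvSetLe]

theorem pv_le_refl (a : List Int) : pvSetLe a a = true := by
  rw [pv_le_iff]; exact fun x hx => hx

theorem pv_le_trans {a b c : List Int} (h1 : pvSetLe a b = true) (h2 : pvSetLe b c = true) :
    pvSetLe a c = true := by
  rw [pv_le_iff] at *
  exact fun x hx => h2 x (h1 x hx)

theorem pv_eq_refl (a : List Int) : pvSetEq a a = true := by
  simp [pvSetEq, pv_le_refl]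

theorem pv_lt_irrefl (a : List Int) : pvSetLt a a = false := by
  simp [pvSetLt, pv_le_refl]

-- composition: something (equal to or below) u, with u (equal to or strictly below) t
theorem pv_below_eq {m u t : List Int} (h1 : (pvSetEq m u || pvSetLt m u) = true)
    (h2 : pvSetEq u t = true) : (pvSetEq m t || pvSetLt m t) = true := by
  simp only [pvSetEq, pvSetLt, Bool.or_eq_true, Bool.and_eq_true, Bool.not_eq_true'] at *
  rcases h1 with ⟨h1a, h1b⟩ | ⟨h1a, h1b⟩
  · exact Or.inl ⟨pv_le_trans h1a h2.1, pv_le_trans h2.2 h1b⟩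
  · refine Or.inr ⟨pv_le_trans h1a h2.1, ?_⟩
    by_contra hc
    simp only [Bool.not_eq_false] at hc
    exact absurd (pv_le_trans h2.1 hc) (by simp [h1b])

theorem pv_below_lt {m u t : List Int} (h1 : (pvSetEq m u || pvSetLt m u) = true)
    (h2 : pvSetLt u t = true) : pvSetLt m t = true := by
  simp only [pvSetEq, pvSetLt, Bool.or_eq_true, Bool.and_eq_true, Bool.not_eq_true'] at *
  rcases h1 with ⟨h1a, h1b⟩ | ⟨h1a, h1b⟩
  · refine ⟨pv_le_trans h1a h2.1, ?_⟩
    by_contra hc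
    simp only [Bool.not_eq_false] at hc
    exact absurd (pv_le_trans hc h1a) (by simp [h2.2])
  · refine ⟨pv_le_trans h1a h2.1, ?_⟩
    by_contra hc
    simp only [Bool.not_eq_false] at hc
    exact absurd (pv_le_trans h2.1 hc) (by simp [h1b])

-- A's filter loop is List.filter
theorem pv_filter_foldl (u l acc : List (List Int)) :
    l.foldl (fun r t => if u.any (fun t2 => pvSetLt t2 t) then r else r ++ [t]) acc
      = acc ++ l.filter (fun t => !u.any (fun t2 => pvSetLt t2 t)) := by
  induction l generalizing acc with
  | nil => simp
  | cons x t ih =>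
    simp only [List.foldl_cons, List.filter_cons]
    by_cases hx : (u.any fun t2 => pvSetLt t2 x) = true
    · rw [if_pos hx, ih, hx]; simp
    · simp only [Bool.not_eq_true] at hx
      rw [if_neg (by simp [hx]), ih, hx]
      simp

theorem pv_A_eq (terms : List (List Int)) : simplify_dnf terms = pvM (pvU terms) := by
  unfold simplify_dnf pvM
  rw [show (terms.foldl (fun u t => if u.any (fun x => pvSetEq x t) then u else u ++ [t]) [])
      = pvU terms from rfl]
  rw [pv_filter_foldl, List.nil_append]

-- a strict count inequality: p implies q on l, and one member has q but not p
theorem pv_countP_lt {α : Type} (l : List α) (p q : α → Bool)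
    (hmono : ∀ x ∈ l, p x = true → q x = true) (u : α) (hu : u ∈ l)
    (hpu : p u = false) (hqu : q u = true) : l.countP p < l.countP q := by
  induction l with
  | nil => cases hu
  | cons x t ih =>
    rcases List.mem_cons.mp hu with rfl | hut
    · have hle : t.countP p ≤ t.countP q :=
        List.countP_mono_left (fun x hx => hmono x (by simp [hx]))
      rw [List.countP_cons, List.countP_cons]
      simp [hpu, hqu]
      omega
    · have hlt : t.countP p < t.countP q := ih (fun x hx => hmono x (by simp [hx])) hut
      rw [List.countP_cons, List.countP_cons]
      by_cases hpx : p x = true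
      · have hqx := hmono x (by simp) hpx
        simp [hpx, hqx]
        omega
      · have hpx' : p x = false := by simpa using hpx
        rcases Bool.eq_false_or_eq_true (q x) with hqx | hqx <;> simp [hpx', hqx] <;> omega

-- every element of u has a minimal element of u equal to it or strictly below it
theorem pv_min_below (u : List (List Int)) (s : List Int) (hs : s ∈ u) :
    ∃ m ∈ pvM u, (pvSetEq m s || pvSetLt m s) = true := by
  generalize hn : u.countP (fun x => pvSetLt x s) = n
  induction n using Nat.strong_induction_on generalizing s with
  | _ n ih =>
    by_cases hmin : (u.any fun t2 => pvSetLt t2 s) = true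
    · rcases List.any_eq_true.mp hmin with ⟨w, hw, hws⟩
      have hcount : u.countP (fun x => pvSetLt x w) < n := by
        rw [← hn]
        exact pv_countP_lt u _ _
          (fun x _ hx => pv_below_lt (by simp [hx]) hws)
          w hw (by simpa using pv_lt_irrefl w) hws
      rcases ih _ hcount w hw rfl with ⟨m, hm, hbelow⟩
      exact ⟨m, hm, by simp [pv_below_lt hbelow hws]⟩
    · refine ⟨s, ?_, by simp [pv_eq_refl]⟩
      unfold pvM
      rw [List.mem_filter]
      exact ⟨hs, by rw [Bool.not_eq_true']; exact Bool.eq_false_iff.mpr hmin⟩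

-- membership in pvM
theorem pv_mem_M {u : List (List Int)} {m : List Int} (h : m ∈ pvM u) :
    m ∈ u ∧ (u.any fun t2 => pvSetLt t2 m) = false := by
  unfold pvM at h
  rw [List.mem_filter] at h
  exact ⟨h.1, by simpa [Bool.not_eq_true'] using h.2⟩

-- the snoc step of A's dedup accumulator
theorem pv_U_append (ts : List (List Int)) (t : List Int) :
    pvU (ts ++ [t]) = if (pvU ts).any (fun x => pvSetEq x t) then pvU ts else pvU ts ++ [t] := by
  unfold pvU
  rw [List.foldl_append]
  simp

-- B agrees with "minimal elements of A's dedup list", by induction from the right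
theorem pv_B_eq (ts : List (List Int)) : simplify_dnf_alt ts = pvM (pvU ts) := by
  induction ts using List.reverseRecOn with
  | nil => rfl
  | append_singleton ts t ih =>
    have hstep : simplify_dnf_alt (ts ++ [t])
        = (if (pvM (pvU ts)).any (fun m => pvSetEq m t || pvSetLt m t) then pvM (pvU ts)
           else (pvM (pvU ts)).filter (fun m => !pvSetLt t m) ++ [t]) := by
      unfold simplify_dnf_alt at ih ⊢
      rw [List.foldl_append, ih]
      simp
    rw [hstep, pv_U_append]
    by_cases h1 : ((pvU ts).any fun x => pvSetEq x t) = true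
    · -- t is a duplicate of some unique element: both sides unchanged
      rw [if_pos h1]
      rcases List.any_eq_true.mp h1 with ⟨w, hw, hwt⟩
      rcases pv_min_below (pvU ts) w hw with ⟨m, hm, hbelow⟩
      have hskip : ((pvM (pvU ts)).any fun m => pvSetEq m t || pvSetLt m t) = true :=
        List.any_eq_true.mpr ⟨m, hm, pv_below_eq hbelow hwt⟩
      rw [if_pos hskip]
    · rw [if_neg h1]
      by_cases h2 : ((pvU ts).any fun u => pvSetLt u t) = true
      · -- t is absorbed by an existing unique element
        rcases List.any_eq_true.mp h2 with ⟨w, hw, hwt⟩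
        rcases pv_min_below (pvU ts) w hw with ⟨m, hm, hbelow⟩
        have hskip : ((pvM (pvU ts)).any fun m => pvSetEq m t || pvSetLt m t) = true :=
          List.any_eq_true.mpr ⟨m, hm, by simp [pv_below_lt hbelow hwt]⟩
        rw [if_pos hskip]
        -- pvM is unchanged by appending t: t itself fails, old elements are unaffected
        unfold pvM
        rw [List.filter_append]
        have ht : (((pvU ts) ++ [t]).any fun t2 => pvSetLt t2 t) = true := by
          rw [List.any_append]
          simp only [Bool.or_eq_true]
          exact Or.inl h2
        have hone : List.filter (fun s => !((pvU ts) ++ [t]).any fun t2 => pvSetLt t2 s) [t] = [] := by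
          simp only [List.filter_cons, List.filter_nil, ht]
          simp
        rw [hone, List.append_nil]
        apply List.filter_congr
        intro s _
        rw [List.any_append]
        simp only [List.any_cons, List.any_nil, Bool.or_false]
        by_cases hts : pvSetLt t s = true
        · have hws : pvSetLt w s = true := pv_below_lt (by simp [hwt]) hts
          have hu : ((pvU ts).any fun t2 => pvSetLt t2 s) = true :=
            List.any_eq_true.mpr ⟨w, hw, hws⟩
          rw [hu, hts]; rfl
        · simp only [Bool.not_eq_true] at hts
          rw [hts, Bool.or_false]
      · -- t is genuinely new and minimal: it absorbs kept supersets and is appended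
        have hskip : ((pvM (pvU ts)).any fun m => pvSetEq m t || pvSetLt m t) = false := by
          rw [List.any_eq_false]
          intro m hm
          rcases pv_mem_M hm with ⟨hmU, _⟩
          simp only [Bool.or_eq_true, not_or]
          constructor
          · intro hc
            exact h1 (List.any_eq_true.mpr ⟨m, hmU, hc⟩)
          · intro hc
            exact h2 (List.any_eq_true.mpr ⟨m, hmU, hc⟩)
        rw [if_neg (by simp [hskip])]
        unfold pvM
        rw [List.filter_append]
        have h2' : ((pvU ts).any fun u => pvSetLt u t) = false := Bool.eq_false_iff.mpr h2
        have hone : List.filter (fun s => !((pvU ts) ++ [t]).any fun t2 => pvSetLt t2 s) [t] = [t] := by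
          have hf : (((pvU ts) ++ [t]).any fun t2 => pvSetLt t2 t) = false := by
            rw [List.any_append, h2']
            simp [pv_lt_irrefl]
          simp only [List.filter_cons, List.filter_nil, hf]
          simp
        rw [hone]
        congr 1
        rw [List.filter_filter]
        apply List.filter_congr
        intro s _
        rw [List.any_append]
        simp only [List.any_cons, List.any_nil, Bool.or_false, Bool.not_or]
        rw [Bool.and_comm]

-- ===== VERDICT (by name: the statement is the Claim_ definition above) =====
theorem simplify_dnf_spec : Claim_equal_simplify_dnf := by
  intro terms _
  unfold Spec_simplify_dnf
  rw [pv_A_eq, pv_B_eq]
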